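-- pv_equiv track=rewrite | github.com/yoonseonchoi/3-2_CT_assignment | Practice13/lockers.py | runNLockers
-- ===== SOURCE A (Python) =====
-- def runNLockers(n:int) -> int:
--     openLocker = []
--     lockers = [False]*n
--     for i in range(n):
--         for j in range(i, n, i+1):
--             lockers[j] = not lockers[j]
--     for k, locker in enumerate(lockers):
--         if locker:
--             openLocker.append(k+1)
--     return len(openLocker)
-- ===== SOURCE B (Python) =====
-- def runNLockers(n: int) -> int:
--     # after the toggle process exactly the perfect-square lockers stay open,
--     # so the answer is the integer square root of n (0 for n <= 0)
--     if n <= 0: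
--         return 0
--     k = 0
--     while (k + 1) * (k + 1) <= n:
--         k += 1
--     return k
-- ===== Notes on version B (the rewrite author's own statement) =====
-- stated objective: faster
-- what changed: B replaces the O(n log n) locker-toggling simulation (a boolean array toggled along every stride) by computing the integer square root of n with a simple counting loop, using the fact that exactly the perfect-square lockers end up open.
import Mathlib
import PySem

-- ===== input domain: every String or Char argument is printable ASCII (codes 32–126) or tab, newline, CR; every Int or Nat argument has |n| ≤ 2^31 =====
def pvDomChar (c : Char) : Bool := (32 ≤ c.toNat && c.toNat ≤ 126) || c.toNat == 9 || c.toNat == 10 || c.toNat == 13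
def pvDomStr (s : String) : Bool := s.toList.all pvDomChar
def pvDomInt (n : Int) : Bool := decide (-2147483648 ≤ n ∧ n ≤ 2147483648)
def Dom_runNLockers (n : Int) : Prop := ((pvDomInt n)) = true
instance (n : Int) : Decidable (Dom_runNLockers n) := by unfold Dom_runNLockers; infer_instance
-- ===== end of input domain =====

-- B replaces the locker-toggling simulation by an integer-square-root counting loop
-- (exactly the perfect-square lockers end up open), a faster algorithm.

-- ===== PORT A =====
-- loop body 'lockers[j] = not lockers[j]'; an Array mirrors the O(1) index assignment of the
-- Python list (every j produced by the loops is a valid non-negative index, proved below)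
def pvToggle (lk : Array Bool) (j : Int) : Array Bool :=
  if h : j.toNat < lk.size then lk.set j.toNat (! lk[j.toNat]) else lk

def runNLockers (n : Int) : Int :=
  let lockers0 : Array Bool := Array.replicate n.toNat false     -- [False]*n
  let lockers := (PySem.List.pyRange 0 n 1).foldl
    (fun lk i => (PySem.List.pyRange i n (i+1)).foldl pvToggle lk) lockers0
  -- 'for k, locker in enumerate(lockers): if locker: openLocker.append(k+1)'
  -- (enumerate carried as an explicit counter k in the fold state)
  let openLocker := (lockers.toList.foldl
    (fun (acc : List Int × Int) locker =>
      (if locker then acc.1 ++ [acc.2 + 1] else acc.1, acc.2 + 1)) (([] : List Int), 0)).1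
  PySem.List.len openLocker

-- ===== PORT B =====
-- 'while (k+1)*(k+1) <= n: k += 1'; the fuel n.toNat bounds the number of
-- iterations (the loop runs isqrt(n) ≤ n times), it only makes the recursion structural
def pvSqrtLoop (n : Int) (fuel : Nat) (k : Int) : Int :=
  match fuel with
  | 0 => k
  | fuel + 1 => if (k+1)*(k+1) ≤ n then pvSqrtLoop n fuel (k+1) else k

def runNLockers_alt (n : Int) : Int :=
  if n ≤ 0 then 0 else pvSqrtLoop n n.toNat 0

-- ===== PRECONDITION & SPEC =====
def Spec_runNLockers (n : Int) (out : Int) : Prop := out = runNLockers_alt n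
instance (n : Int) (out : Int) : Decidable (Spec_runNLockers n out) := by unfold Spec_runNLockers; infer_instance

-- ===== CLAIM (what is proved, stated in full; the proofs are below) =====
def Claim_equal_runNLockers : Prop := ∀ (n : Int), Dom_runNLockers n → Spec_runNLockers n (runNLockers n)

-- ===== LEMMAS AND PROOFS =====

-- folding toggles preserves the size
theorem pv_foldl_toggle_length (L : List Int) (lk : Array Bool) :
    (L.foldl pvToggle lk).size = lk.size := by
  induction L generalizing lk with
  | nil => rfl
  | cons a L ih =>
      rw [List.foldl_cons, ih, pvToggle]
      split
      · rw [Array.size_set]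
      · rfl

-- elementwise effect of folding toggles: entry j is flipped once per occurrence of j
theorem pv_foldl_toggle_getD (L : List Int) (j : Nat) (lk : Array Bool)
    (h : ∀ a ∈ L, 0 ≤ a ∧ a < (lk.size : Int)) (hj : j < lk.size) :
    (L.foldl pvToggle lk).toList.getD j false
      = xor (lk.toList.getD j false) (decide (Odd (L.count ((j : Nat) : Int)))) := by
  induction L generalizing lk with
  | nil => simp
  | cons a L ih =>
      obtain ⟨ha0, halen⟩ := h a List.mem_cons_self
      have htn : a.toNat < lk.size := by omega
      have hstep : (pvToggle lk a).toList = lk.toList.set a.toNat (! lk.toList[a.toNat]'(by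
          rw [Array.length_toList]; exact htn)) := by
        rw [pvToggle, dif_pos htn, Array.toList_set, Array.getElem_toList]
      have hlen : (pvToggle lk a).size = lk.size := by
        rw [pvToggle, dif_pos htn, Array.size_set]
      rw [List.foldl_cons,
        ih (pvToggle lk a)
          (fun b hb => by rw [hlen]; exact h b (List.mem_cons_of_mem _ hb))
          (by rw [hlen]; exact hj)]
      have hjl : j < lk.toList.length := by rw [Array.length_toList]; exact hj
      rw [hstep, List.getD_eq_getElem _ _ (by rw [List.length_set]; exact hjl),
        List.getD_eq_getElem _ _ hjl, List.getElem_set, List.count_cons]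
      by_cases hc : a.toNat = j
      · subst hc
        have hbe : (a == ((a.toNat : Nat) : Int)) = true := by
          simp only [beq_iff_eq]; omega
        rw [if_pos rfl, hbe, if_pos rfl]
        have hodd : decide (Odd (L.count ((a.toNat : Nat) : Int) + 1))
            = ! decide (Odd (L.count ((a.toNat : Nat) : Int))) := by
          simp only [Nat.odd_add_one, decide_not]
        rw [hodd]
        cases lk.toList[a.toNat] <;> cases decide (Odd (L.count ((a.toNat : Nat) : Int))) <;> rfl
      · have hbe : (a == ((j : Nat) : Int)) = false := by
          simp only [beq_eq_false_iff_ne, ne_eq]; omega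
        rw [if_neg hc, hbe, if_neg (by simp)]
        simp

-- a pyRange with positive step has no duplicates
theorem pv_nodup_pyRange_pos (a b s : Int) (hs : 0 < s) :
    (PySem.List.pyRange a b s).Nodup := by
  rw [PySem.List.pyRange_of_pos a b hs]
  refine List.Nodup.map ?_ List.nodup_range
  intro x y hxy
  have hxy' : a + s * (x : Int) = a + s * (y : Int) := hxy
  have h2 : s * (x : Int) = s * (y : Int) := by omega
  have h3 := mul_left_cancel₀ (ne_of_gt hs) h2
  exact_mod_cast h3

-- list countP over range as a Finset card
theorem pv_countP_range (p : Nat → Bool) (N : Nat) :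
    (List.range N).countP p = ((Finset.range N).filter (fun i => p i = true)).card := by
  induction N with
  | zero => rfl
  | succ N ih =>
      rw [List.range_succ, List.countP_append, Finset.range_add_one, Finset.filter_insert]
      by_cases hp : p N = true <;>
        simp [hp, ih, Finset.card_insert_of_notMem]

-- the divisor-count as a filter of range
theorem pv_card_divisors_eq (m N : Nat) (h1 : 1 ≤ m) (h2 : m ≤ N) :
    ((Finset.range N).filter (fun i => (i+1) ∣ m)).card = m.divisors.card := by
  refine Finset.card_nbij' (fun i => i + 1) (fun d => d - 1) ?_ ?_ ?_ ?_
  · intro i hi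
    simp only [Finset.coe_filter, Set.mem_setOf_eq, Finset.mem_range] at hi
    simp only [Finset.mem_coe, Nat.mem_divisors]
    exact ⟨hi.2, by omega⟩
  · intro d hd
    simp only [Finset.mem_coe, Nat.mem_divisors] at hd
    have hd1 : 1 ≤ d := Nat.pos_of_mem_divisors (Nat.mem_divisors.mpr hd)
    have hdm : d ≤ m := Nat.le_of_dvd (by omega) hd.1
    simp only [Finset.coe_filter, Set.mem_setOf_eq, Finset.mem_range]
    constructor
    · omega
    · rw [Nat.sub_add_cancel hd1]; exact hd.1
  · intro i _; simp
  · intro d hd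
    simp only [Finset.mem_coe, Nat.mem_divisors] at hd
    have hd1 : 1 ≤ d := Nat.pos_of_mem_divisors (Nat.mem_divisors.mpr hd)
    simp only []
    omega

-- a number has an odd number of divisors iff it is a perfect square
theorem pv_odd_card_divisors_iff (m : Nat) (hm : m ≠ 0) :
    Odd m.divisors.card ↔ IsSquare m := by
  have hST : (m.divisors.filter (fun d => d * d < m)).card
      = (m.divisors.filter (fun d => m < d * d)).card := by
    refine Finset.card_nbij' (fun d => m / d) (fun d => m / d) ?_ ?_ ?_ ?_
    · intro d hd
      simp only [Finset.coe_filter, Set.mem_setOf_eq, Nat.mem_divisors] at hd ⊢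
      obtain ⟨⟨hdvd, hm0⟩, hlt⟩ := hd
      have hdpos : 0 < d :=
        Nat.pos_of_ne_zero (fun h => hm0 (by subst h; exact Nat.eq_zero_of_zero_dvd hdvd))
      have hde : d * (m / d) = m := Nat.mul_div_cancel' hdvd
      have hepos : 0 < m / d := by
        rcases Nat.eq_zero_or_pos (m / d) with h | h
        · rw [h, Nat.mul_zero] at hde; omega
        · exact h
      have hlt2 : d < m / d := by
        by_contra hcon
        have hcon' : m / d ≤ d := by omega
        have : d * (m / d) ≤ d * d := Nat.mul_le_mul (le_refl d) hcon'
        omega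
      refine ⟨⟨⟨d, (Nat.div_mul_cancel hdvd).symm⟩, hm0⟩, ?_⟩
      have h9 : d * (m / d) < (m / d) * (m / d) := (Nat.mul_lt_mul_right hepos).mpr hlt2
      omega
    · intro d hd
      simp only [Finset.coe_filter, Set.mem_setOf_eq, Nat.mem_divisors] at hd ⊢
      obtain ⟨⟨hdvd, hm0⟩, hlt⟩ := hd
      have hdpos : 0 < d :=
        Nat.pos_of_ne_zero (fun h => hm0 (by subst h; exact Nat.eq_zero_of_zero_dvd hdvd))
      have hde : d * (m / d) = m := Nat.mul_div_cancel' hdvd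
      have hepos : 0 < m / d := by
        rcases Nat.eq_zero_or_pos (m / d) with h | h
        · rw [h, Nat.mul_zero] at hde; omega
        · exact h
      have hlt2 : m / d < d := by
        by_contra hcon
        have hcon' : d ≤ m / d := by omega
        have : d * d ≤ d * (m / d) := Nat.mul_le_mul (le_refl d) hcon'
        omega
      refine ⟨⟨⟨d, (Nat.div_mul_cancel hdvd).symm⟩, hm0⟩, ?_⟩
      have h9 : (m / d) * (m / d) < d * (m / d) := (Nat.mul_lt_mul_right hepos).mpr hlt2
      omega
    · intro d hd
      simp only [Finset.coe_filter, Set.mem_setOf_eq, Nat.mem_divisors] at hd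
      exact Nat.div_div_self hd.1.1 hd.1.2
    · intro d hd
      simp only [Finset.coe_filter, Set.mem_setOf_eq, Nat.mem_divisors] at hd
      exact Nat.div_div_self hd.1.1 hd.1.2
  have hF : (m.divisors.filter (fun d => d * d = m)).card
      = (if IsSquare m then 1 else 0) := by
    by_cases hs : IsSquare m
    · rw [if_pos hs, Finset.card_eq_one]
      obtain ⟨r, hr⟩ := hs
      refine ⟨r, ?_⟩
      ext d
      simp only [Finset.mem_filter, Nat.mem_divisors, Finset.mem_singleton]
      constructor
      · rintro ⟨_, hdd⟩
        exact Nat.mul_self_inj.mp (by rw [hdd, hr])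
      · intro hdr
        have hdd : d * d = m := by rw [hdr, ← hr]
        exact ⟨⟨⟨d, hdd.symm⟩, hm⟩, hdd⟩
    · rw [if_neg hs, Finset.card_eq_zero, Finset.eq_empty_iff_forall_notMem]
      intro d hd
      simp only [Finset.mem_filter, Nat.mem_divisors] at hd
      exact hs ⟨d, hd.2.symm⟩
  have hsplit : m.divisors.card
      = (m.divisors.filter (fun d => d * d < m)).card
        + ((m.divisors.filter (fun d => d * d = m)).card
          + (m.divisors.filter (fun d => m < d * d)).card) := by
    rw [← Finset.card_filter_add_card_filter_not (s := m.divisors) (fun d => d * d < m)]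
    congr 1
    rw [← Finset.card_filter_add_card_filter_not
      (s := m.divisors.filter (fun d => ¬ d * d < m)) (fun d => d * d = m)]
    rw [Finset.filter_filter, Finset.filter_filter]
    congr 1
    · congr 1
      ext d
      simp only [Finset.mem_filter]
      exact and_congr Iff.rfl (by omega)
    · congr 1
      ext d
      simp only [Finset.mem_filter]
      exact and_congr Iff.rfl (by omega)
  rw [hsplit, hST, hF]
  by_cases hs : IsSquare m
  · simp only [hs, if_true, iff_true, Nat.odd_iff]
    omega
  · simp only [hs, if_false, iff_false, Nat.odd_iff]
    omega

-- counting squares in [1,N] is the integer square root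
theorem pv_sqrt_succ (N : Nat) :
    Nat.sqrt (N+1) = Nat.sqrt N + (if IsSquare (N+1) then 1 else 0) := by
  have hub : Nat.sqrt (N+1) ≤ Nat.sqrt N + 1 := by
    have h1 : N + 1 ≤ (Nat.sqrt N + 1) ^ 2 := Nat.lt_succ_sqrt' N
    have h2 := Nat.sqrt_le_sqrt h1
    rwa [Nat.sqrt_eq'] at h2
  have hlb : Nat.sqrt N ≤ Nat.sqrt (N+1) := Nat.sqrt_le_sqrt (by omega)
  by_cases hs : IsSquare (N+1)
  · obtain ⟨r, hr⟩ := hs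
    rcases Nat.eq_zero_or_pos r with hr0 | hr0
    · subst hr0; omega
    have h1 : Nat.sqrt (N+1) = r := by
      rw [hr, ← pow_two, Nat.sqrt_eq']
    have h2 : Nat.sqrt N < r := by
      rw [Nat.sqrt_lt', pow_two]; omega
    rw [if_pos ⟨r, hr⟩]
    omega
  · rw [if_neg hs]
    by_contra hcon
    have ht : Nat.sqrt (N+1) = Nat.sqrt N + 1 := by omega
    have h1 : (Nat.sqrt N + 1) ^ 2 ≤ N + 1 := by
      rw [← ht]; exact Nat.sqrt_le' (N+1)
    have h2 : N < (Nat.sqrt N + 1) ^ 2 := Nat.lt_succ_sqrt' N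
    exact hs ⟨Nat.sqrt N + 1, by rw [← pow_two]; omega⟩

theorem pv_countP_squares (N : Nat) :
    (List.range N).countP (fun j => decide (IsSquare (j+1))) = Nat.sqrt N := by
  induction N with
  | zero => rfl
  | succ N ih =>
      rw [List.range_succ, List.countP_append, ih, pv_sqrt_succ]
      by_cases h : IsSquare (N+1)
      · simp [h]
      · simp [h]

-- the append-if fold with a counter collects one element per true entry
theorem pv_open_loop_length (l : List Bool) (acc : List Int) (s : Int) :
    ((l.foldl (fun (acc : List Int × Int) locker =>
        (if locker then acc.1 ++ [acc.2 + 1] else acc.1, acc.2 + 1)) (acc, s)).1).length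
      = acc.length + l.countP (fun b => b) := by
  induction l generalizing acc s with
  | nil => simp
  | cons b l ih =>
      rw [List.foldl_cons, List.countP_cons]
      by_cases hb : b
      · rw [ih]; simp [hb]; omega
      · rw [ih]; simp [hb]

-- a 0/1 map-sum is a countP
theorem pv_sum_ite (p : Nat → Bool) (l : List Nat) :
    (l.map (fun k => if p k then 1 else 0)).sum = l.countP p := by
  induction l with
  | nil => rfl
  | cons a l ih =>
      rw [List.map_cons, List.sum_cons, ih, List.countP_cons]
      by_cases h : p a
      · simp [h]; omega
      · simp [h]

-- B's loop computes Nat.sqrt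
theorem pv_sqrtLoop_eq (n : Int) (hn : 0 < n) :
    ∀ (fuel : Nat) (k : Nat), Nat.sqrt n.toNat - k ≤ fuel → k ≤ Nat.sqrt n.toNat →
      pvSqrtLoop n fuel (k : Int) = (Nat.sqrt n.toNat : Int) := by
  have hcond : ∀ k : Nat, (((k : Int) + 1) * ((k : Int) + 1) ≤ n) ↔ k + 1 ≤ Nat.sqrt n.toNat := by
    intro k
    constructor
    · intro hle
      have h1 : (((k+1) * (k+1) : Nat) : Int) ≤ n := by push_cast; linarith
      have h2 : (k+1) * (k+1) ≤ n.toNat := by omega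
      exact Nat.le_sqrt'.mpr (by rw [pow_two]; exact h2)
    · intro hle
      have h2 : (k+1) * (k+1) ≤ n.toNat := by
        have h3 : (k+1)^2 ≤ (Nat.sqrt n.toNat)^2 := Nat.pow_le_pow_left hle 2
        have h4 := Nat.sqrt_le' n.toNat
        simp only [pow_two] at h3 h4
        exact le_trans h3 h4
      have : (((k+1) * (k+1) : Nat) : Int) ≤ (n.toNat : Int) := by exact_mod_cast h2
      rw [Int.toNat_of_nonneg hn.le] at this
      push_cast at this
      linarith
  intro fuel
  induction fuel with
  | zero =>
      intro k hf hk
      have hk' : k = Nat.sqrt n.toNat := by omega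
      rw [pvSqrtLoop]
      exact_mod_cast hk'
  | succ fuel ih =>
      intro k hf hk
      rw [pvSqrtLoop]
      by_cases hle : ((k : Int) + 1) * ((k : Int) + 1) ≤ n
      · rw [if_pos hle]
        have hk1 := (hcond k).mp hle
        have : ((k : Int) + 1) = ((k + 1 : Nat) : Int) := by push_cast; ring
        rw [this]
        exact ih (k+1) (by omega) hk1
      · rw [if_neg hle]
        have : ¬ (k + 1 ≤ Nat.sqrt n.toNat) := fun h => hle ((hcond k).mpr h)
        have hk' : k = Nat.sqrt n.toNat := by omega
        exact_mod_cast hk'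

-- A computes the number of perfect squares in [1, n]
theorem pv_runNLockers_eq_countP (n : Int) (hn : 0 < n) :
    runNLockers n = ((List.range n.toNat).countP (fun j => decide (IsSquare (j+1))) : Int) := by
  have hNn : ((n.toNat : Nat) : Int) = n := Int.toNat_of_nonneg hn.le
  simp only [runNLockers]
  rw [← List.foldl_flatMap]
  set N := n.toNat with hN
  set L := (PySem.List.pyRange 0 n 1).flatMap (fun i => PySem.List.pyRange i n (i+1)) with hL
  have hlen0 : (Array.replicate N false).size = N := Array.size_replicate
  have hmemL : ∀ a ∈ L, 0 ≤ a ∧ a < ((Array.replicate N false).size : Int) := by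
    intro a ha
    rw [hL, List.mem_flatMap] at ha
    obtain ⟨i, hi, hai⟩ := ha
    rw [PySem.List.mem_pyRange_one] at hi
    rw [PySem.List.mem_pyRange_iff_of_pos (by omega)] at hai
    rw [hlen0]
    omega
  have hcount : ∀ j : Nat, j < N →
      L.count ((j : Nat) : Int) = (List.range N).countP (fun i => decide ((i+1) ∣ (j+1))) := by
    intro j hj
    rw [hL, List.count_flatMap]
    have hrange : PySem.List.pyRange 0 n 1 = (List.range N).map (fun k => ((k : Nat) : Int)) := by
      rw [PySem.List.pyRange_one]
      simp [hN]
    rw [hrange, List.map_map]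
    have hper : ∀ k ∈ List.range N,
        ((List.count ((j:Nat):Int) ∘ (fun i => PySem.List.pyRange i n (i+1))) ∘ fun k => ((k:Nat):Int)) k
          = (fun k => if (fun i => decide ((i+1) ∣ (j+1))) k then 1 else 0) k := by
      intro k hk
      rw [List.mem_range] at hk
      simp only [Function.comp_apply]
      have hmem : ((j:Nat):Int) ∈ PySem.List.pyRange ((k:Nat):Int) n (((k:Nat):Int)+1)
          ↔ (k+1) ∣ (j+1) := by
        rw [PySem.List.mem_pyRange_iff_of_pos (by omega)]
        constructor
        · rintro ⟨h1, h2, h3⟩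
          have h4 : ((k:Int)+1) ∣ ((j:Int)+1) := by
            have h5 : ((j:Int)+1) - ((j:Int) - (k:Int)) = (k:Int)+1 := by ring
            have h6 : ((k:Int)+1) ∣ ((j:Int) - (k:Int)) := h3
            have h7 : ((k:Int)+1) ∣ (((j:Int) - (k:Int)) + ((k:Int)+1)) := Dvd.dvd.add h6 dvd_rfl
            have h8 : ((j:Int) - (k:Int)) + ((k:Int)+1) = (j:Int)+1 := by ring
            rwa [h8] at h7
          have h9 : ((k+1 : Nat) : Int) ∣ ((j+1 : Nat) : Int) := by push_cast; exact_mod_cast h4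
          exact_mod_cast h9
        · intro hdvd
          have hle : k+1 ≤ j+1 := Nat.le_of_dvd (by omega) hdvd
          have h4 : ((k:Int)+1) ∣ ((j:Int)+1) := by exact_mod_cast hdvd
          refine ⟨by omega, by omega, ?_⟩
          have h5 : ((k:Int)+1) ∣ (((j:Int)+1) - ((k:Int)+1)) := Int.dvd_sub h4 dvd_rfl
          have h6 : ((j:Int)+1) - ((k:Int)+1) = (j:Int) - (k:Int) := by ring
          rwa [h6] at h5
      by_cases hd : (k+1) ∣ (j+1)
      · rw [List.count_eq_one_of_mem (pv_nodup_pyRange_pos _ _ _ (by omega)) (hmem.mpr hd)]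
        simp [hd]
      · rw [List.count_eq_zero_of_not_mem (fun hc => hd (hmem.mp hc))]
        simp [hd]
    rw [List.map_congr_left hper, pv_sum_ite]
  have hfinal : (L.foldl pvToggle (Array.replicate N false)).toList
      = (List.range N).map (fun j => decide (IsSquare (j+1))) := by
    apply List.ext_getElem
    · rw [Array.length_toList, pv_foldl_toggle_length, hlen0, List.length_map, List.length_range]
    · intro j h1 h2
      have hjN : j < N := by
        rwa [Array.length_toList, pv_foldl_toggle_length, hlen0] at h1
      rw [← List.getD_eq_getElem _ false h1, pv_foldl_toggle_getD L j _ hmemL (by omega),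
        Array.toList_replicate, List.getD_replicate false hjN]
      rw [List.getElem_map, List.getElem_range]
      rw [hcount j hjN]
      have hodd : Odd ((List.range N).countP (fun i => decide ((i+1) ∣ (j+1)))) ↔ IsSquare (j+1) := by
        rw [pv_countP_range, ← pv_odd_card_divisors_iff (j+1) (by omega)]
        have : ((Finset.range N).filter (fun i => decide ((i+1) ∣ (j+1)) = true))
            = ((Finset.range N).filter (fun i => (i+1) ∣ (j+1))) := by
          apply Finset.filter_congr
          intro i _
          simp
        rw [this, pv_card_divisors_eq (j+1) N (by omega) (by omega)]
      simp only [Bool.false_xor]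
      exact (decide_eq_decide).mpr hodd
  rw [hfinal]
  rw [PySem.List.len_eq, pv_open_loop_length, List.countP_map]
  simp [Function.comp_def]

-- ===== VERDICT (by name: the statement is the Claim_ definition above) =====
theorem runNLockers_spec : Claim_equal_runNLockers := by
  intro n _
  unfold Spec_runNLockers runNLockers_alt
  by_cases hn : n ≤ 0
  · have h0 : n.toNat = 0 := by omega
    simp [runNLockers, PySem.List.pyRange_one_eq_nil hn, h0, hn, PySem.List.len]
  · have hn' : 0 < n := by omega
    rw [pv_runNLockers_eq_countP n hn', pv_countP_squares, if_neg (by omega)]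
    have h := pv_sqrtLoop_eq n hn' n.toNat 0
      (by have := Nat.sqrt_le_self n.toNat; omega) (Nat.zero_le _)
    rw [Nat.cast_zero] at h
    exact h.symm
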